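-- pv_equiv track=rewrite | github.com/SmartAppUnipi/RoboComment | Symbolic/game_model/game_model.py | _compute_closest_player
-- ===== SOURCE A (Python) =====
-- def _compute_closest_player(pot_owners):
--     closest = None
--     dist = 1000
--     for e in pot_owners:
--         if e['distance'] < dist:
--             closest = e['id']
--             dist = e['distance']
--
--     return closest
-- ===== SOURCE B (Python) =====
-- def _compute_closest_player(pot_owners):
--     ordered = sorted(pot_owners, key=lambda e: e['distance'])
--     if ordered and ordered[0]['distance'] < 1000:
--         return ordered[0]['id']
--     return None
-- ===== Notes on version B (the rewrite author's own statement) =====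
-- stated objective: alternative
-- what changed: Replaces the running-minimum scan with a stable sort by 'distance' followed by a guarded look at the head (stability keeps the first-occurrence winner, the '< 1000' guard reproduces the sentinel).
import Mathlib
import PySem

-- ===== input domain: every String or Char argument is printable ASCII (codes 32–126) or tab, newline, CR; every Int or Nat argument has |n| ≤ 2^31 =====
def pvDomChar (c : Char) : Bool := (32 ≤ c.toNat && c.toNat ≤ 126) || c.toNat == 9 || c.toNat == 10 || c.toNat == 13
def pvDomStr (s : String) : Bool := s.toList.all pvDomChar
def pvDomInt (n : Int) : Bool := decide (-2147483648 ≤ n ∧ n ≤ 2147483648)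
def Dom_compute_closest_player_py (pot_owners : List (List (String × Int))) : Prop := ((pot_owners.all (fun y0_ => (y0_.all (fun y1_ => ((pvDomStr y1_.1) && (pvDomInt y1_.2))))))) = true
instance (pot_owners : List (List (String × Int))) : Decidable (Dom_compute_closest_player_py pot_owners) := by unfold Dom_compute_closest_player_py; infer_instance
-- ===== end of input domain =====

-- B replaces A's running-minimum scan with a stable sort by 'distance' plus a guarded head access (alternative decomposition, same results).


-- ===== PORT A =====
-- e[k] on the dict e; exact whenever the key is present (Pre_ guarantees that; Python raises KeyError otherwise)
def pvLookup (e : List (String × Int)) (k : String) : Int :=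
  ((PySem.Dict.mk e).get? k).getD 0

def compute_closest_player_py (pot_owners : List (List (String × Int))) : Option Int :=
  (pot_owners.foldl
    (fun (st : Option Int × Int) e =>
      if pvLookup e "distance" < st.2 then (some (pvLookup e "id"), pvLookup e "distance") else st)
    (none, 1000)).1

-- ===== PORT B =====
def compute_closest_player_py_alt (pot_owners : List (List (String × Int))) : Option Int :=
  let ordered := PySem.List.sorted pot_owners (fun e => pvLookup e "distance")
  match ordered with
  | [] => none
  | e :: _ => if pvLookup e "distance" < 1000 then some (pvLookup e "id") else none

-- ===== PRECONDITION & SPEC =====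
-- Pre_ is exactly the no-KeyError domain of A: every player dict contains 'distance', and contains 'id'
-- whenever its distance is below 1000 and strictly below every earlier player's distance (the only
-- elements whose 'id' A reads).
def Pre_compute_closest_player_py (pot_owners : List (List (String × Int))) : Prop :=
  ∀ i : Fin pot_owners.length,
    (PySem.Dict.mk pot_owners[i]).contains "distance" = true ∧
    ((pvLookup pot_owners[i] "distance" < 1000 ∧
        ∀ j : Fin pot_owners.length, j.val < i.val →
          pvLookup pot_owners[i] "distance" < pvLookup pot_owners[j] "distance") →
      (PySem.Dict.mk pot_owners[i]).contains "id" = true)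
instance (pot_owners : List (List (String × Int))) : Decidable (Pre_compute_closest_player_py pot_owners) := by unfold Pre_compute_closest_player_py; infer_instance
def pvWitness_compute_closest_player_py : (List (List (String × Int))) :=
  [[("distance", 3), ("id", 7)], [("distance", 2), ("id", 9)]]

def Spec_compute_closest_player_py (pot_owners : List (List (String × Int))) (out : Option Int) : Prop := out = compute_closest_player_py_alt pot_owners
instance (pot_owners : List (List (String × Int))) (out : Option Int) : Decidable (Spec_compute_closest_player_py pot_owners out) := by unfold Spec_compute_closest_player_py; infer_instance

-- ===== CLAIM (what is proved, stated in full; the proofs are below) =====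
def Claim_equal_compute_closest_player_py : Prop := ∀ (pot_owners : List (List (String × Int))), Dom_compute_closest_player_py pot_owners → Pre_compute_closest_player_py pot_owners → Spec_compute_closest_player_py pot_owners (compute_closest_player_py pot_owners)

-- ===== LEMMAS AND PROOFS =====

-- the first element of l attaining the minimal 'distance' (strict-improvement rule = first occurrence on ties)
def pvFirstMin (l : List (List (String × Int))) : Option (List (String × Int)) :=
  match l with
  | [] => none
  | x :: xs =>
    match pvFirstMin xs with
    | none => some x
    | some m => if pvLookup m "distance" < pvLookup x "distance" then some m else some x

lemma pvA_char (l : List (List (String × Int))) : ∀ (c : Option Int) (d : Int),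
    (l.foldl
      (fun (st : Option Int × Int) e =>
        if pvLookup e "distance" < st.2 then (some (pvLookup e "id"), pvLookup e "distance") else st)
      (c, d)) =
    match pvFirstMin l with
    | none => (c, d)
    | some m => if pvLookup m "distance" < d then (some (pvLookup m "id"), pvLookup m "distance") else (c, d) := by
  induction l with
  | nil => intro c d; simp [pvFirstMin]
  | cons x xs ih =>
    intro c d
    simp only [List.foldl_cons, pvFirstMin]
    cases hfm : pvFirstMin xs with
    | none =>
      by_cases hx : pvLookup x "distance" < d <;> simp [hx, ih, hfm]
    | some m =>
      by_cases hx : pvLookup x "distance" < d <;>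
        by_cases hm : pvLookup m "distance" < pvLookup x "distance" <;>
        by_cases hmd : pvLookup m "distance" < d <;>
        simp [hx, hm, hmd, ih, hfm] <;> omega

lemma pvHead_insertBy (x : List (String × Int)) (acc : List (List (String × Int))) :
    (PySem.List.insertBy (fun a b => decide (pvLookup a "distance" < pvLookup b "distance")) x acc).head? =
    match acc.head? with
    | none => some x
    | some y => if pvLookup x "distance" < pvLookup y "distance" then some x else some y := by
  cases acc with
  | nil => simp [PySem.List.insertBy]
  | cons y ys =>
    simp only [PySem.List.insertBy, List.head?]
    split_ifs with h <;> simp_all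

lemma pvHead_foldl_ins (l : List (List (String × Int))) : ∀ (acc : List (List (String × Int))),
    ((l.foldl (fun acc x => PySem.List.insertBy (fun a b => decide (pvLookup a "distance" < pvLookup b "distance")) x acc) acc).head?) =
    match pvFirstMin l, acc.head? with
    | none, h => h
    | some m, none => some m
    | some m, some y => if pvLookup m "distance" < pvLookup y "distance" then some m else some y := by
  induction l with
  | nil => intro acc; simp [pvFirstMin]
  | cons x xs ih =>
    intro acc
    simp only [List.foldl_cons, pvFirstMin]
    rw [ih, pvHead_insertBy]
    cases hfm : pvFirstMin xs with
    | none =>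
      cases hacc : acc.head? with
      | none => simp
      | some y => simp
    | some m =>
      cases hacc : acc.head? with
      | none =>
        by_cases hm : pvLookup m "distance" < pvLookup x "distance" <;> simp [hm]
      | some y =>
        by_cases hm : pvLookup m "distance" < pvLookup x "distance" <;>
          by_cases hxy : pvLookup x "distance" < pvLookup y "distance" <;>
          by_cases hmy : pvLookup m "distance" < pvLookup y "distance" <;>
          simp [hm, hxy, hmy] <;> omega

lemma pvSorted_head (l : List (List (String × Int))) :
    (PySem.List.sorted l (fun e => pvLookup e "distance")).head? = pvFirstMin l := by
  rw [PySem.List.sorted_eq_foldl_insertBy, pvHead_foldl_ins]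
  cases pvFirstMin l <;> rfl

-- ===== VERDICT (by name: the statement is the Claim_ definition above) =====
theorem compute_closest_player_py_spec : Claim_equal_compute_closest_player_py := by
  intro pot_owners _ _
  unfold Spec_compute_closest_player_py compute_closest_player_py compute_closest_player_py_alt
  rw [pvA_char]
  have hh := pvSorted_head pot_owners
  cases hfm : pvFirstMin pot_owners with
  | none =>
    rw [hfm] at hh
    rcases List.head?_eq_none_iff.mp hh with h
    simp [h]
  | some m =>
    rw [hfm] at hh
    obtain ⟨t, ht⟩ := List.head?_eq_some_iff.mp hh
    simp only [ht]
    split_ifs <;> rfl
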